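-- pv_equiv track=rewrite | github.com/pypi-data/pypi-mirror-342 | packages/xython/xython-4.0.6-py3-none-any.whl/xython/xy_util.py | combine_two_list_1d_as_list_2d
-- ===== SOURCE A (Python) =====
-- def combine_two_list_1d_as_list_2d(input_list_2d_1, input_list_2d_2):
-- 	"""
-- 	선택한 영역이 2개를 서로 같은것을 기준으로 묶을려고하는것이다
-- 	제일앞의 한줄이 같은것이다
-- 	만약 묶을려고 할때 자료가 없을때는 그 기준자료만큼 빈자료를 넣어서 다음자료를 추가하는 것이다
--
-- 	:param input_list_2d_1:
-- 	:param input_list_2d_2: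
-- 	:return:
-- 	"""
-- 	no_of_list_2d_1 = len(input_list_2d_1[0]) - 1
-- 	no_of_list_2d_2 = len(input_list_2d_2[0]) - 1
-- 	empty_list_2d_1 = [""] * no_of_list_2d_1
-- 	empty_list_2d_2 = [""] * no_of_list_2d_2
-- 	# 리스트형태로는 코드가 더 길어질것으로 보여서 입력자료를 사전으로 변경 한것
-- 	temp_dic = {}
-- 	for one in input_list_2d_1:
-- 		temp_dic[one[0]] = one[1:]
-- 	checked_list = []
-- 	# 기준이 되는 자료에 항목이 있을때
-- 	for one in input_list_2d_2:
-- 		if one[0] in temp_dic.keys():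
-- 			temp_dic[one[0]] = list(temp_dic[one[0]]) + list(one[1:])
-- 		else:
-- 			temp_dic[one[0]] = empty_list_2d_1 + list(one[1:])
-- 		checked_list.append(one[0])
-- 	# 기준자료에 항목이 없는것에 대한것
-- 	for one in temp_dic.keys():
-- 		if not one in checked_list:
-- 			temp_dic[one] = list(temp_dic[one]) + empty_list_2d_2
-- 	# 사전형식을 리스트로 다시 만드는것
-- 	result = []
-- 	for one in temp_dic:
-- 		result.append([one] + list(temp_dic[one]))
-- 	return result
-- ===== SOURCE B (Python) =====
-- def combine_two_list_1d_as_list_2d(input_list_2d_1, input_list_2d_2):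
-- 	empty_1 = [""] * (len(input_list_2d_1[0]) - 1)
-- 	empty_2 = [""] * (len(input_list_2d_2[0]) - 1)
-- 	d1 = {}
-- 	for row in input_list_2d_1:
-- 		d1[row[0]] = list(row[1:])
-- 	d2 = {}
-- 	for row in input_list_2d_2:
-- 		d2[row[0]] = d2.get(row[0], []) + list(row[1:])
-- 	keys = list(d1) + [k for k in d2 if k not in d1]
-- 	return [[k] + d1.get(k, empty_1) + d2.get(k, empty_2) for k in keys]
-- ===== Notes on version B (the rewrite author's own statement) =====
-- stated objective: simpler
-- what changed: Replaces A's mutate-one-dict strategy (seed dict from list1, patch it in place while tracking a checked_list, then a third corrective loop padding unvisited keys) with a symmetric two-dict merge: an overwrite dict for list1, an accumulate dict for list2, then one pass over the ordered key union emitting [k] + d1.get(k, empty_1) + d2.get(k, empty_2).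
import Mathlib
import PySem

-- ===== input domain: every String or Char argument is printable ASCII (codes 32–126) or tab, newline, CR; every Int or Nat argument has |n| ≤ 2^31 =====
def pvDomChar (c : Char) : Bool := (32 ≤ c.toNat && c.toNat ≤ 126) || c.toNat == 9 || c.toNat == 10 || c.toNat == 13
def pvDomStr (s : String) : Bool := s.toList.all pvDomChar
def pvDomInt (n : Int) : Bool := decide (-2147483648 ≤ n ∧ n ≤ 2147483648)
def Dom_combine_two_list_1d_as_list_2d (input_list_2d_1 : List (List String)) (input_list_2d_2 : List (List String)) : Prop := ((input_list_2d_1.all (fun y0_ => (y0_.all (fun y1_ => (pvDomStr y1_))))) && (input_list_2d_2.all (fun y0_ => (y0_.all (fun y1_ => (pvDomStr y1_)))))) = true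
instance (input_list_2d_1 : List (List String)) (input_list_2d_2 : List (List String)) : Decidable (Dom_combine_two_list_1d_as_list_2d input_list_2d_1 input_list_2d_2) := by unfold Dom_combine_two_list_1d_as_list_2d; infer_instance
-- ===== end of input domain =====

-- B replaces A's mutate-one-dict-plus-checked-list-plus-corrective-loop strategy by a symmetric
-- two-dict merge (overwrite dict for list 1, accumulate dict for list 2) and one output pass.

-- ===== PORT A =====
-- one step of A's second loop (the if/else assignment into temp_dic)
def pvAStep (e1 : List String) (d : PySem.Dict String (List String)) (one : List String) : PySem.Dict String (List String) :=
  if d.contains (one.headD "") then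
    d.insert (one.headD "") (d.getD (one.headD "") [] ++ one.drop 1)
  else
    d.insert (one.headD "") (e1 ++ one.drop 1)

-- `xs[0]` / `one[0]` are written `headD` here: exact because Pre_ excludes empty lists and rows
def combine_two_list_1d_as_list_2d (input_list_2d_1 : List (List String)) (input_list_2d_2 : List (List String)) : List (List String) :=
  let e1 : List String := List.replicate ((input_list_2d_1.headD []).length - 1) ""
  let e2 : List String := List.replicate ((input_list_2d_2.headD []).length - 1) ""
  let d0 : PySem.Dict String (List String) :=
    input_list_2d_1.foldl (fun d one => d.insert (one.headD "") (one.drop 1)) PySem.Dict.empty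
  let st : PySem.Dict String (List String) × List String :=
    input_list_2d_2.foldl (fun st one => (pvAStep e1 st.1 one, st.2 ++ [one.headD ""])) (d0, [])
  let d3 : PySem.Dict String (List String) :=
    st.1.keys.foldl (fun d k => if ¬ (k ∈ st.2) then d.insert k (d.getD k [] ++ e2) else d) st.1
  d3.items.map (fun p => p.1 :: p.2)

-- ===== PORT B =====
def combine_two_list_1d_as_list_2d_alt (input_list_2d_1 : List (List String)) (input_list_2d_2 : List (List String)) : List (List String) :=
  let e1 : List String := List.replicate ((input_list_2d_1.headD []).length - 1) ""
  let e2 : List String := List.replicate ((input_list_2d_2.headD []).length - 1) ""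
  let d1 : PySem.Dict String (List String) :=
    input_list_2d_1.foldl (fun d row => d.insert (row.headD "") (row.drop 1)) PySem.Dict.empty
  let d2 : PySem.Dict String (List String) :=
    input_list_2d_2.foldl (fun d row => d.modify (row.headD "") [] (· ++ row.drop 1)) PySem.Dict.empty
  let keys : List String := d1.keys ++ d2.keys.filter (fun k => !(d1.contains k))
  keys.map (fun k => [k] ++ d1.getD k e1 ++ d2.getD k e2)

-- ===== PRECONDITION & SPEC =====
-- A indexes `input_list_2d_1[0]`, `input_list_2d_2[0]` and `one[0]`: it raises IndexError on an
-- empty input list or an empty row, so exactly those inputs are excluded (B raises there too).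
def Pre_combine_two_list_1d_as_list_2d (input_list_2d_1 : List (List String)) (input_list_2d_2 : List (List String)) : Prop :=
  input_list_2d_1 ≠ [] ∧ input_list_2d_2 ≠ [] ∧
  (∀ r ∈ input_list_2d_1, r ≠ []) ∧ (∀ r ∈ input_list_2d_2, r ≠ [])
instance (input_list_2d_1 : List (List String)) (input_list_2d_2 : List (List String)) : Decidable (Pre_combine_two_list_1d_as_list_2d input_list_2d_1 input_list_2d_2) := by unfold Pre_combine_two_list_1d_as_list_2d; infer_instance
def pvWitness_combine_two_list_1d_as_list_2d : List (List String) × List (List String) :=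
  ([["a", "1"], ["b", "2"]], [["b", "x"], ["c", "y"]])

def Spec_combine_two_list_1d_as_list_2d (input_list_2d_1 : List (List String)) (input_list_2d_2 : List (List String)) (out : List (List String)) : Prop := out = combine_two_list_1d_as_list_2d_alt input_list_2d_1 input_list_2d_2
instance (input_list_2d_1 : List (List String)) (input_list_2d_2 : List (List String)) (out : List (List String)) : Decidable (Spec_combine_two_list_1d_as_list_2d input_list_2d_1 input_list_2d_2 out) := by unfold Spec_combine_two_list_1d_as_list_2d; infer_instance

-- ===== CLAIM (what is proved, stated in full; the proofs are below) =====
def Claim_equal_combine_two_list_1d_as_list_2d : Prop := ∀ (input_list_2d_1 : List (List String)) (input_list_2d_2 : List (List String)), Dom_combine_two_list_1d_as_list_2d input_list_2d_1 input_list_2d_2 → Pre_combine_two_list_1d_as_list_2d input_list_2d_1 input_list_2d_2 → Spec_combine_two_list_1d_as_list_2d input_list_2d_1 input_list_2d_2 (combine_two_list_1d_as_list_2d input_list_2d_1 input_list_2d_2)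

-- ===== LEMMAS AND PROOFS =====

-- the concatenation, in order, of the tails of the rows of l whose key is k
def pvG (l : List (List String)) (k : String) : List String :=
  (l.filter (fun one => one.headD "" == k)).flatMap (fun one => one.drop 1)

theorem pvG_nil (k : String) : pvG [] k = [] := rfl

theorem pvG_cons (one : List String) (l : List (List String)) (k : String) :
    pvG (one :: l) k = (if one.headD "" = k then one.drop 1 else []) ++ pvG l k := by
  simp only [pvG, List.filter_cons, List.headD_eq_head?_getD]
  by_cases h : one.head?.getD "" = k <;> simp [h]

theorem pvG_eq_nil (l : List (List String)) (k : String)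
    (h : ¬ k ∈ l.map (fun one => one.headD "")) : pvG l k = [] := by
  have h' : ∀ one ∈ l, ¬ ((fun one => one.headD "" == k) one = true) := by
    simp only [List.mem_map, not_exists] at h
    intro one hone hb
    exact h one ⟨hone, by simpa using hb⟩
  unfold pvG
  rw [List.filter_eq_nil_iff.mpr h', List.flatMap_nil]

-- any getD through contains
theorem pv_getD_ite (d : PySem.Dict String (List String)) (k : String) (e : List String) :
    d.getD k e = if d.contains k = true then d.getD k [] else e := by
  rw [PySem.Dict.getD_eq_get?_getD, PySem.Dict.getD_eq_get?_getD, PySem.Dict.contains_eq_isSome_get?]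
  cases d.get? k <;> simp

-- B's second dict: value at k is the accumulated tails
theorem pvB2_getD (l : List (List String)) (d : PySem.Dict String (List String)) (k : String) :
    (l.foldl (fun d row => d.modify (row.headD "") [] (· ++ row.drop 1)) d).getD k []
      = d.getD k [] ++ pvG l k := by
  induction l generalizing d with
  | nil => simp [pvG_nil]
  | cons row t ih =>
    simp only [List.foldl_cons]
    rw [ih, PySem.Dict.getD_modify, pvG_cons]
    by_cases h : row.headD "" = k
    all_goals simp only [List.headD_eq_head?_getD] at h
    · simp [← h, List.append_assoc]
    · simp [h, Ne.symm h]

theorem pvAStep_eq (e1 : List String) (d : PySem.Dict String (List String)) (one : List String) :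
    pvAStep e1 d one
      = d.insert (one.headD "")
          ((if d.contains (one.headD "") = true then d.getD (one.headD "") [] else e1) ++ one.drop 1) := by
  unfold pvAStep
  split_ifs with h
  · simp
  · simp

theorem pvA2_getD (e1 : List String) (l : List (List String)) (d : PySem.Dict String (List String)) (k : String) :
    (l.foldl (pvAStep e1) d).getD k []
      = (if d.contains k = true then d.getD k []
         else if k ∈ l.map (fun one => one.headD "") then e1 else []) ++ pvG l k := by
  induction l generalizing d with
  | nil =>
    by_cases h : d.contains k = true
    · simp [h, pvG_nil]
    · simp only [Bool.not_eq_true] at h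
      simp [h, pvG_nil, PySem.Dict.getD_of_not_contains d [] h]
  | cons one t ih =>
    simp only [List.foldl_cons]
    rw [ih, pvG_cons, pvAStep_eq]
    by_cases hk : k = one.headD ""
    · subst hk
      simp [PySem.Dict.contains_insert_self, List.append_assoc]
    · rw [PySem.Dict.getD_insert, PySem.Dict.contains_insert]
      simp only [List.headD_eq_head?_getD] at hk
      simp [hk, Ne.symm hk]

theorem pvA2_keys (e1 : List String) (l : List (List String)) (d : PySem.Dict String (List String)) :
    (l.foldl (pvAStep e1) d).keys = PySem.Set.update d.keys (l.map (fun one => one.headD "")) := by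
  have hfun : pvAStep e1 = fun d one => d.insert (one.headD "")
      ((if d.contains (one.headD "") = true then d.getD (one.headD "") [] else e1) ++ one.drop 1) :=
    funext fun d => funext fun (one : List String) => pvAStep_eq e1 d one
  rw [hfun]
  exact PySem.Dict.keys_foldl_insert_key l (fun (one : List String) => one.headD "")
    (fun d one => (if d.contains (one.headD "") = true then d.getD (one.headD "") [] else e1) ++ List.drop 1 one) d

-- A's third loop: keys are unchanged
theorem pvA3_keys (checked e2 : List String) (ks : List String) (d : PySem.Dict String (List String))
    (h : ∀ k ∈ ks, d.contains k = true) :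
    (ks.foldl (fun d k => if ¬ (k ∈ checked) then d.insert k (d.getD k [] ++ e2) else d) d).keys = d.keys := by
  induction ks generalizing d with
  | nil => rfl
  | cons k0 t ih =>
    simp only [List.foldl_cons]
    by_cases hc : k0 ∈ checked
    · rw [if_neg (not_not_intro hc)]
      exact ih d (fun k hk => h k (List.mem_cons_of_mem _ hk))
    · have hk0 : d.contains k0 = true := h k0 List.mem_cons_self
      have hkeys : (d.insert k0 (d.getD k0 [] ++ e2)).keys = d.keys :=
        PySem.Dict.keys_insert_of_contains d _ hk0
      rw [if_pos hc, ih _ (fun k hk => ?_), hkeys]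
      rw [PySem.Dict.contains_insert]
      simp [h k (List.mem_cons_of_mem _ hk)]

-- A's third loop: values
theorem pvA3_getD (checked e2 : List String) (ks : List String) (d : PySem.Dict String (List String)) (k : String)
    (hnd : ks.Nodup) :
    (ks.foldl (fun d k => if ¬ (k ∈ checked) then d.insert k (d.getD k [] ++ e2) else d) d).getD k []
      = if k ∈ ks ∧ ¬ k ∈ checked then d.getD k [] ++ e2 else d.getD k [] := by
  induction ks generalizing d with
  | nil => simp
  | cons k0 t ih =>
    rcases List.nodup_cons.mp hnd with ⟨hk0t, hndt⟩
    simp only [List.foldl_cons]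
    rw [ih _ hndt]
    by_cases hc : k0 ∈ checked
    · by_cases hkk : k = k0
      · subst hkk
        simp [hc, hk0t]
      · simp [hc, hkk]
    · by_cases hkk : k = k0
      · subst hkk
        simp [hc, hk0t]
      · simp [hc, hkk, PySem.Dict.getD_insert]

theorem pv_main (l1 l2 : List (List String)) :
    combine_two_list_1d_as_list_2d l1 l2 = combine_two_list_1d_as_list_2d_alt l1 l2 := by
  dsimp only [combine_two_list_1d_as_list_2d, combine_two_list_1d_as_list_2d_alt]
  set e1 := List.replicate ((l1.headD []).length - 1) "" with he1
  set e2 := List.replicate ((l2.headD []).length - 1) "" with he2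
  rw [PySem.List.foldl_prod_mk (f := pvAStep e1) (g := fun c (one : List String) => c ++ [one.headD ""]),
      PySem.List.foldl_append_singleton_eq_map (f := fun (one : List String) => one.headD "")]
  dsimp only
  rw [List.nil_append]
  set d1 := l1.foldl (fun d one => d.insert (one.headD "") (List.drop 1 one)) PySem.Dict.empty with hd1
  set d2 := l2.foldl (fun d row => d.modify (row.headD "") [] (· ++ List.drop 1 row)) PySem.Dict.empty with hd2
  set checked := l2.map (fun (one : List String) => one.headD "") with hchecked
  set dA2 := l2.foldl (pvAStep e1) d1 with hdA2
  have hnd1 : d1.keys.Nodup := by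
    rw [hd1]
    exact PySem.Dict.nodup_keys_foldl_insert_key l1 _ _ _ (by simp)
  have hkeysA2 : dA2.keys = PySem.Set.update d1.keys checked := pvA2_keys e1 l2 d1
  have hndA2 : dA2.keys.Nodup := by rw [hkeysA2]; exact PySem.Set.nodup_update _ _ hnd1
  set d3 := dA2.keys.foldl (fun d k => if ¬ (k ∈ checked) then d.insert k (d.getD k [] ++ e2) else d) dA2 with hd3
  have hkeys3 : d3.keys = dA2.keys := by
    rw [hd3]
    exact pvA3_keys checked e2 dA2.keys dA2 (fun k hk => (PySem.Dict.contains_iff_mem_keys dA2 k).mpr hk)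
  have hnd3 : d3.keys.Nodup := by rw [hkeys3]; exact hndA2
  have hkeys2 : d2.keys = PySem.Set.ofList checked := by
    rw [hd2, PySem.Dict.keys_foldl_modify_key l2 (fun (row : List String) => row.headD "") []
          (fun d row v => v ++ List.drop 1 row) PySem.Dict.empty]
    simp [PySem.Set.update_nil_left, hchecked, List.headD_eq_head?_getD]
  have hfil : List.filter (fun k => !(d1.contains k)) d2.keys
      = List.filter (fun y => !(PySem.Set.contains d1.keys y)) (PySem.Set.ofList checked) := by
    rw [hkeys2]
    refine List.filter_congr (fun y _ => ?_)
    simp [PySem.Dict.contains_eq_decide_mem_keys, PySem.Set.contains_eq_listContains]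
  rw [PySem.Dict.items_eq_map_keys d3 hnd3 [], List.map_map, hkeys3, hkeysA2, hfil,
      ← PySem.Set.update_eq_append_filter]
  refine List.map_congr_left (fun k hk => ?_)
  have hmem : k ∈ d1.keys ∨ k ∈ checked := (PySem.Set.mem_update _ _ _).mp hk
  have hkA2 : k ∈ dA2.keys := by rw [hkeysA2]; exact hk
  have hA3 : d3.getD k [] = if k ∈ dA2.keys ∧ ¬ k ∈ checked then dA2.getD k [] ++ e2 else dA2.getD k [] := by
    rw [hd3]; exact pvA3_getD checked e2 dA2.keys dA2 k hndA2
  have hA2 : dA2.getD k []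
      = (if d1.contains k = true then d1.getD k [] else if k ∈ checked then e1 else []) ++ pvG l2 k := by
    rw [hdA2, pvA2_getD]
  have hd2getD : d2.getD k [] = pvG l2 k := by
    rw [hd2, pvB2_getD]
    simp [PySem.Dict.getD_empty]
  simp only [Function.comp_apply]
  by_cases hc : k ∈ checked
  · have hc2 : d2.contains k = true :=
      (PySem.Dict.contains_iff_mem_keys d2 k).mpr (by rw [hkeys2]; exact (PySem.Set.mem_ofList _ _).mpr hc)
    rw [hA3, if_neg (by simp [hc]), hA2, pv_getD_ite d1 k e1, pv_getD_ite d2 k e2, if_pos hc2, hd2getD]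
    simp [hc]
  · have hk1 : k ∈ d1.keys := hmem.resolve_right hc
    have hc1 : d1.contains k = true := (PySem.Dict.contains_iff_mem_keys d1 k).mpr hk1
    have hc2 : d2.contains k = false := by
      rw [PySem.Dict.contains_eq_decide_mem_keys, hkeys2]
      simp [PySem.Set.mem_ofList, hc]
    have hg : pvG l2 k = [] := pvG_eq_nil l2 k hc
    rw [hA3, if_pos ⟨hkA2, hc⟩, hA2, pv_getD_ite d1 k e1, if_pos hc1,
        PySem.Dict.getD_of_not_contains d2 e2 hc2, hg, hc1]
    simp

-- ===== VERDICT (by name: the statement is the Claim_ definition above) =====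
theorem combine_two_list_1d_as_list_2d_spec : Claim_equal_combine_two_list_1d_as_list_2d := by
  intro l1 l2 _ _
  unfold Spec_combine_two_list_1d_as_list_2d
  exact pv_main l1 l2
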